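-- pv_equiv track=rewrite | github.com/maneshd/advent-of-code | 2022/16/day16.py | transformed_graph
-- ===== SOURCE A (Python) =====
-- from collections import deque
--
-- def BFS(G, s):
--     dist = {s:0}
--     to_process = deque([s])
--
--     while to_process:
--         u = to_process.popleft()
--         for v in G[u]:
--             if v in dist:
--                 continue
--             dist[v] = dist[u] + 1
--             to_process.append(v)
--
--     return dist
--
-- def transformed_graph(G, flows):
--     nodes = ["AA"] + [node for (node, flow) in flows.items() if flow > 0]
--     GG = {node: [] for node in nodes}
--
--     for s in nodes:
--         d = BFS(G, s)
--         for t in nodes: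
--             if t in (s, 'AA'):  # no self-edges; don't go back to AA
--                 continue
--             GG[s].append((t, d[t]+1))  # add 1 for time to open valve
--
--     return GG
-- ===== SOURCE B (Python) =====
-- def transformed_graph(G, flows):
--     nodes = ["AA"] + [node for (node, flow) in flows.items() if flow > 0]
--
--     # All relevant-source distances at once by Bellman-Ford-style relaxation:
--     # no per-source traversal, no queue -- len(G) rounds of relaxing every edge.
--     dist = {(s, s): 0 for s in nodes}
--     for _ in range(len(G)):
--         for u, adj in G.items():
--             for v in adj:
--                 for s in nodes:
--                     du = dist.get((s, u))
--                     if du is not None: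
--                         dv = dist.get((s, v))
--                         if dv is None or du + 1 < dv:
--                             dist[(s, v)] = du + 1
--
--     out = {node: [] for node in nodes}
--     for s in nodes:
--         out[s] += [(t, dist[(s, t)] + 1) for t in nodes if t not in (s, "AA")]
--     return out
-- ===== Notes on version B (the rewrite author's own statement) =====
-- stated objective: alternative
-- what changed: Replaces A's per-source BFS (deque, frontier expansion) with dynamic programming: one shared distance table over (source,node) pairs filled by len(G) rounds of Bellman-Ford edge relaxation over all edges and all relevant sources at once, then the same row assembly.
import Mathlib
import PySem

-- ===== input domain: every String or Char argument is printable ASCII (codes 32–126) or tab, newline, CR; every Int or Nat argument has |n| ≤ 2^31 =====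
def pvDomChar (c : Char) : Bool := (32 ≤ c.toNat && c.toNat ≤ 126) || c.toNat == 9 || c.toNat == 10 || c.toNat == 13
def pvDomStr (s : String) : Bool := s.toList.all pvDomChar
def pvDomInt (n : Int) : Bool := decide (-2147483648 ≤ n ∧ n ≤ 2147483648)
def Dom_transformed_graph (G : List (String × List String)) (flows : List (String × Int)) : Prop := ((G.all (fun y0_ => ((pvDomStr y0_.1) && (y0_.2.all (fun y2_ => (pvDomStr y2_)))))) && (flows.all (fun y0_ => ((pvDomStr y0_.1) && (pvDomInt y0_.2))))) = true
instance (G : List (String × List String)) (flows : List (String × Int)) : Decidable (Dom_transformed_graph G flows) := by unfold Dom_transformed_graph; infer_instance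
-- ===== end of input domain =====

-- B replaces A's per-source BFS with dynamic programming: one distance table over
-- (source, node) pairs filled by len(G) rounds of Bellman-Ford edge relaxation
-- (objective: alternative).

-- ===== PORT A =====
-- BFS inner loop body: 'for v in G[u]: if v in dist: continue; dist[v] = dist[u] + 1; to_process.append(v)'
-- ('dist[u]' is ported as getD u 0: u is always a key of dist when this line runs, so this is exact)
def bfsStepA (u : String) (st : PySem.Dict String Int × List String) (v : String) : PySem.Dict String Int × List String :=
  if st.1.contains v then st else (st.1.insert v (st.1.getD u 0 + 1), st.2 ++ [v])

-- 'while to_process: u = to_process.popleft(); …'  (fuel is only a totality guard; none also = KeyError on G[u])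
def bfsGoA (Gd : PySem.Dict String (List String)) : Nat → PySem.Dict String Int → List String → Option (PySem.Dict String Int)
  | _, dist, [] => some dist
  | 0, _, _ :: _ => none
  | fuel + 1, dist, u :: rest =>
    match Gd.get? u with
    | none => none
    | some adj =>
      let st := adj.foldl (bfsStepA u) (dist, rest)
      bfsGoA Gd fuel st.1 st.2

-- inner 'for t in nodes: if t in (s, "AA"): continue; GG[s].append((t, d[t]+1))' (none = KeyError on d[t];
-- GG[s] exists whenever this runs, so modify with default [] is exact)
def rowA (d : PySem.Dict String Int) (s : String) (GG : PySem.Dict String (List (String × Int))) : List String → Option (PySem.Dict String (List (String × Int)))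
  | [] => some GG
  | t :: ts =>
    if t = s ∨ t = "AA" then rowA d s GG ts
    else
      match d.get? t with
      | none => none
      | some dt => rowA d s (GG.modify s [] (fun l => l ++ [(t, dt + 1)])) ts

-- outer 'for s in nodes: d = BFS(G, s); …'
def outerA (Gd : PySem.Dict String (List String)) (fuel : Nat) (nodes : List String) : List String → PySem.Dict String (List (String × Int)) → Option (PySem.Dict String (List (String × Int)))
  | [], GG => some GG
  | s :: ss, GG =>
    match bfsGoA Gd fuel ((PySem.Dict.empty).insert s 0) [s] with
    | none => none
    | some d =>
      match rowA d s GG nodes with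
      | none => none
      | some GG' => outerA Gd fuel nodes ss GG'

def transformed_graph (G : List (String × List String)) (flows : List (String × Int)) : List (String × List (String × Int)) :=
  let Gd := PySem.Dict.ofList G
  let nodes := "AA" :: (((PySem.Dict.ofList flows).items.filter (fun p => decide (0 < p.2))).map Prod.fst)
  let GG0 := nodes.foldl (fun d n => d.insert n ([] : List (String × Int))) PySem.Dict.empty
  let fuel := 1 + Gd.size + Gd.values.foldl (fun a l => a + l.length) 0
  match outerA Gd fuel nodes nodes GG0 with
  | none => []          -- unreachable under Pre_: Python raises KeyError exactly there
  | some GG => GG.items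

-- ===== PORT B =====
-- innermost 'for s in nodes: du = dist.get((s, u)); if du is not None: …' body, one s
def relaxB (u v : String) (dist : PySem.Dict (String × String) Int) (s : String) : PySem.Dict (String × String) Int :=
  match dist.get? (s, u) with
  | none => dist
  | some du =>
    match dist.get? (s, v) with
    | none => dist.insert (s, v) (du + 1)
    | some dv => if du + 1 < dv then dist.insert (s, v) (du + 1) else dist

-- one round: 'for u, adj in G.items(): for v in adj: for s in nodes: …'
def roundB (nodes : List String) (items : List (String × List String)) (dist : PySem.Dict (String × String) Int) : PySem.Dict (String × String) Int :=
  items.foldl (fun d p => p.2.foldl (fun d v => nodes.foldl (relaxB p.1 v) d) d) dist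

-- row comprehension '[(t, dist[(s, t)] + 1) for t in nodes if t not in (s, "AA")]' (none = KeyError on dist[(s, t)])
def rowB (dist : PySem.Dict (String × String) Int) (s : String) : List String → Option (List (String × Int))
  | [] => some []
  | t :: ts =>
    if t = s ∨ t = "AA" then rowB dist s ts
    else
      match dist.get? (s, t) with
      | none => none
      | some dt =>
        match rowB dist s ts with
        | none => none
        | some l => some ((t, dt + 1) :: l)

-- 'for s in nodes: out[s] += […]'  (out[s] exists whenever this runs, so modify with default [] is exact)
def assembleB (dist : PySem.Dict (String × String) Int) (nodes : List String) : List String → PySem.Dict String (List (String × Int)) → Option (PySem.Dict String (List (String × Int)))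
  | [], out => some out
  | s :: ss, out =>
    match rowB dist s nodes with
    | none => none
    | some l => assembleB dist nodes ss (out.modify s [] (fun r => r ++ l))

def transformed_graph_alt (G : List (String × List String)) (flows : List (String × Int)) : List (String × List (String × Int)) :=
  let Gd := PySem.Dict.ofList G
  let nodes := "AA" :: (((PySem.Dict.ofList flows).items.filter (fun p => decide (0 < p.2))).map Prod.fst)
  let dist0 := nodes.foldl (fun d s => d.insert (s, s) (0 : Int)) PySem.Dict.empty
  let dist := (List.range Gd.size).foldl (fun d _ => roundB nodes Gd.items d) dist0
  let out0 := nodes.foldl (fun d n => d.insert n ([] : List (String × Int))) PySem.Dict.empty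
  match assembleB dist nodes nodes out0 with
  | none => []          -- unreachable under Pre_: Python raises KeyError exactly there
  | some out => out.items

-- ===== PRECONDITION & SPEC =====
-- Pre_ excludes exactly the inputs on which the Python A raises KeyError: from some relevant
-- valve s, the BFS reaches a node that is not a key of G, or some relevant valve t (looked up
-- in d) is unreachable from s.  Reachability is stated as the |U|-fold neighbourhood closure
-- of {s} (the transitive closure over the finitely many names U occurring in the input) —
-- a bound-and-membership condition, not a copy of either port's loop.
def Pre_transformed_graph (G : List (String × List String)) (flows : List (String × Int)) : Prop :=
  let Gd := PySem.Dict.ofList G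
  let nodes := "AA" :: (((PySem.Dict.ofList flows).items.filter (fun p => decide (0 < p.2))).map Prod.fst)
  let U := PySem.List.dedup (nodes ++ Gd.keys ++ Gd.values.flatten)
  let closure : String → List String := fun s =>
    (fun S => PySem.List.dedup (S ++ S.flatMap (fun u => Gd.getD u [])))^[U.length] [s]
  ∀ s ∈ nodes,
    (∀ u ∈ closure s, u ∈ Gd.keys) ∧
    (∀ t ∈ nodes, t ≠ s → t ≠ "AA" → t ∈ closure s)
instance (G : List (String × List String)) (flows : List (String × Int)) : Decidable (Pre_transformed_graph G flows) := by unfold Pre_transformed_graph; infer_instance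

def pvWitness_transformed_graph : (List (String × List String)) × (List (String × Int)) := ([("AA", [])], [])

def Spec_transformed_graph (G : List (String × List String)) (flows : List (String × Int)) (out : List (String × List (String × Int))) : Prop := out = transformed_graph_alt G flows
instance (G : List (String × List String)) (flows : List (String × Int)) (out : List (String × List (String × Int))) : Decidable (Spec_transformed_graph G flows out) := by unfold Spec_transformed_graph; infer_instance

-- ===== CLAIM (what is proved, stated in full; the proofs are below) =====
def Claim_equal_transformed_graph : Prop := ∀ (G : List (String × List String)) (flows : List (String × Int)), Dom_transformed_graph G flows → Pre_transformed_graph G flows → Spec_transformed_graph G flows (transformed_graph G flows)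

-- ===== LEMMAS AND PROOFS =====
-- ---- reachability levels: rk Gd s k = nodes reachable from s in ≤ k steps ----
def rstep (Gd : PySem.Dict String (List String)) (S : Finset String) : Finset String :=
  S ∪ S.biUnion (fun u => (Gd.getD u []).toFinset)

def rk (Gd : PySem.Dict String (List String)) (s : String) (k : Nat) : Finset String :=
  (rstep Gd)^[k] {s}

lemma rk_zero (Gd : PySem.Dict String (List String)) (s : String) : rk Gd s 0 = {s} := rfl

lemma rk_succ (Gd : PySem.Dict String (List String)) (s : String) (k : Nat) :
    rk Gd s (k + 1) = rstep Gd (rk Gd s k) := Function.iterate_succ_apply' _ _ _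

lemma mem_rk_succ (Gd : PySem.Dict String (List String)) (s : String) (k : Nat) (t : String) :
    t ∈ rk Gd s (k + 1) ↔ t ∈ rk Gd s k ∨ ∃ u ∈ rk Gd s k, t ∈ Gd.getD u [] := by
  rw [rk_succ]
  simp [rstep]

lemma rk_mono_succ (Gd : PySem.Dict String (List String)) (s : String) (k : Nat) :
    rk Gd s k ⊆ rk Gd s (k + 1) := by
  intro t ht; rw [mem_rk_succ]; exact Or.inl ht

lemma rk_mono (Gd : PySem.Dict String (List String)) (s : String) {k m : Nat} (h : k ≤ m) :
    rk Gd s k ⊆ rk Gd s m := by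
  induction m with
  | zero => simp [Nat.le_zero.mp h]
  | succ m ih =>
    rcases Nat.lt_or_ge k (m + 1) with hk | hk
    · exact fun t ht => rk_mono_succ Gd s m (ih (Nat.lt_succ_iff.mp hk) ht)
    · have : k = m + 1 := le_antisymm h hk
      simp [this]

lemma rk_stab (Gd : PySem.Dict String (List String)) (s : String) {k : Nat}
    (h : rk Gd s (k + 1) = rk Gd s k) : ∀ m, k ≤ m → rk Gd s m = rk Gd s k := by
  intro m hm
  induction m with
  | zero => simp [Nat.le_zero.mp hm]
  | succ m ih =>
    rcases Nat.lt_or_ge k (m + 1) with hk | hk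
    · have hmk := Nat.lt_succ_iff.mp hk
      rw [rk_succ, ih hmk, ← rk_succ, h]
    · exact (le_antisymm hm hk ▸ rfl)

lemma card_rk_of_strict (Gd : PySem.Dict String (List String)) (s : String) :
    ∀ k, (∀ j, j < k → rk Gd s (j + 1) ≠ rk Gd s j) → k + 1 ≤ (rk Gd s k).card := by
  intro k
  induction k with
  | zero => intro _; simp [rk_zero]
  | succ k ih =>
    intro h
    have h1 : k + 1 ≤ (rk Gd s k).card := ih (fun j hj => h j (Nat.lt_succ_of_lt hj))
    have h2 : (rk Gd s k).card < (rk Gd s (k + 1)).card :=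
      Finset.card_lt_card (ssubset_of_subset_of_ne (rk_mono_succ Gd s k) (Ne.symm (h k (Nat.lt_succ_self k))))
    omega

-- every rk lives inside {s} ∪ all adjacency values
lemma rk_subset_env (Gd : PySem.Dict String (List String)) (s : String) (k : Nat) :
    rk Gd s k ⊆ insert s Gd.values.flatten.toFinset := by
  induction k with
  | zero => simp [rk_zero]
  | succ k ih =>
    intro t ht
    rw [mem_rk_succ] at ht
    rcases ht with ht | ⟨u, _, htu⟩
    · exact ih ht
    · have : t ∈ Gd.values.flatten := by
        rcases hgu : Gd.get? u with _ | adj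
        · simp [PySem.Dict.getD_eq_get?_getD, hgu] at htu
        · have : adj ∈ Gd.values := by
            have := PySem.Dict.mem_items_of_get?_eq_some Gd hgu
            simp only [PySem.Dict.values]
            exact List.mem_map.mpr ⟨(u, adj), this, rfl⟩
          rw [PySem.Dict.getD_eq_get?_getD, hgu] at htu
          exact List.mem_flatten.mpr ⟨adj, this, htu⟩
      simp [this]

-- stabilization: every rk is inside rk N once N ≥ the number of available names
lemma rk_stabilizes (Gd : PySem.Dict String (List String)) (s : String) (N : Nat)
    (hN : (insert s Gd.values.flatten.toFinset).card ≤ N) :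
    ∀ m, rk Gd s m ⊆ rk Gd s N := by
  have hex : ∃ j, j < N ∧ rk Gd s (j + 1) = rk Gd s j := by
    by_contra hc
    push Not at hc
    have := card_rk_of_strict Gd s N (fun j hj => hc j hj)
    have hle := Finset.card_le_card (rk_subset_env Gd s N)
    omega
  obtain ⟨j, hj, hstab⟩ := hex
  intro m
  rcases Nat.le_total m N with hm | hm
  · exact rk_mono Gd s hm
  · rw [rk_stab Gd s hstab m (le_trans (Nat.le_of_lt hj) hm),
        rk_stab Gd s hstab N (Nat.le_of_lt hj)]

-- first level at which t appears
def isLvl (Gd : PySem.Dict String (List String)) (s : String) (j : Nat) (t : String) : Prop :=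
  t ∈ rk Gd s j ∧ ∀ i, i < j → t ∉ rk Gd s i

lemma isLvl_unique (Gd : PySem.Dict String (List String)) (s : String) {j j' : Nat} {t : String}
    (h : isLvl Gd s j t) (h' : isLvl Gd s j' t) : j = j' := by
  rcases Nat.lt_trichotomy j j' with hl | he | hl
  · exact absurd h.1 (h'.2 j hl)
  · exact he
  · exact absurd h'.1 (h.2 j' hl)

lemma exists_isLvl (Gd : PySem.Dict String (List String)) (s : String) {m : Nat} {t : String}
    (h : t ∈ rk Gd s m) : ∃ j, j ≤ m ∧ isLvl Gd s j t := by
  have hex : ∃ j, t ∈ rk Gd s j := ⟨m, h⟩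
  refine ⟨Nat.find hex, ?_, Nat.find_spec hex, fun i hi => Nat.find_min hex hi⟩
  exact Nat.find_min' hex h

lemma isLvl_le_of_mem (Gd : PySem.Dict String (List String)) (s : String) {j m : Nat} {t : String}
    (h : isLvl Gd s j t) (hm : t ∈ rk Gd s m) : j ≤ m := by
  by_contra hc
  exact h.2 m (Nat.lt_of_not_le hc) hm

-- a node first reached at level k+1 has a predecessor first reached at level k
lemma lvl_succ_witness (Gd : PySem.Dict String (List String)) (s : String) {k : Nat} {t : String}
    (h : isLvl Gd s (k + 1) t) : ∃ u, isLvl Gd s k u ∧ t ∈ Gd.getD u [] := by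
  obtain ⟨ht, hmin⟩ := h
  rw [mem_rk_succ] at ht
  rcases ht with ht | ⟨u, hu, htu⟩
  · exact absurd ht (hmin k (Nat.lt_succ_self k))
  · refine ⟨u, ⟨hu, fun i hi hui => ?_⟩, htu⟩
    have : t ∈ rk Gd s (i + 1) := (mem_rk_succ Gd s i t).mpr (Or.inr ⟨u, hui, htu⟩)
    exact hmin (i + 1) (Nat.succ_lt_succ hi) this
-- ---- the Pre_ closure list computes exactly the rk sets ----
lemma closure_toFinset (Gd : PySem.Dict String (List String)) (s : String) :
    ∀ n, (((fun S => PySem.List.dedup (S ++ S.flatMap (fun u => Gd.getD u [])))^[n] [s]).toFinset : Finset String) = rk Gd s n := by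
  intro n
  induction n with
  | zero => simp [rk_zero]
  | succ n ih =>
    rw [Function.iterate_succ_apply']
    ext t
    simp only [List.mem_toFinset, PySem.List.mem_dedup, List.mem_append, List.mem_flatMap,
      mem_rk_succ, ← ih, List.mem_toFinset]

lemma env_card_le (Gd : PySem.Dict String (List String)) (nodes : List String) (s : String)
    (hs : s ∈ nodes) :
    (insert s Gd.values.flatten.toFinset).card
      ≤ (PySem.List.dedup (nodes ++ Gd.keys ++ Gd.values.flatten)).length := by
  have hsub : insert s Gd.values.flatten.toFinset
      ⊆ (PySem.List.dedup (nodes ++ Gd.keys ++ Gd.values.flatten)).toFinset := by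
    intro t ht
    simp only [Finset.mem_insert, List.mem_toFinset] at ht
    simp only [List.mem_toFinset, PySem.List.mem_dedup, List.mem_append]
    rcases ht with rfl | ht
    · exact Or.inl (Or.inl hs)
    · exact Or.inr ht
  exact le_trans (Finset.card_le_card hsub) (List.toFinset_card_le _)

-- From Pre_'s two clauses for a given s: every rk set is inside the keys of G,
-- and every relevant target is reachable.
lemma pre_rk_keys (Gd : PySem.Dict String (List String)) (nodes : List String) (s : String)
    (hs : s ∈ nodes)
    (h1 : ∀ u ∈ (fun S => PySem.List.dedup (S ++ S.flatMap (fun u => Gd.getD u [])))^[(PySem.List.dedup (nodes ++ Gd.keys ++ Gd.values.flatten)).length] [s], u ∈ Gd.keys) :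
    ∀ m, ∀ t ∈ rk Gd s m, t ∈ Gd.keys := by
  set N := (PySem.List.dedup (nodes ++ Gd.keys ++ Gd.values.flatten)).length with hN
  intro m t ht
  have hsub := rk_stabilizes Gd s N (env_card_le Gd nodes s hs) m
  have : t ∈ rk Gd s N := hsub ht
  rw [← closure_toFinset Gd s N] at this
  exact h1 t (List.mem_toFinset.mp this)

lemma pre_rk_reach (Gd : PySem.Dict String (List String)) (nodes : List String) (s t : String)
    (h2 : t ∈ (fun S => PySem.List.dedup (S ++ S.flatMap (fun u => Gd.getD u [])))^[(PySem.List.dedup (nodes ++ Gd.keys ++ Gd.values.flatten)).length] [s]) :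
    t ∈ rk Gd s ((PySem.List.dedup (nodes ++ Gd.keys ++ Gd.values.flatten)).length) := by
  rw [← closure_toFinset Gd s]
  exact List.mem_toFinset.mpr h2
-- ---- proof-side level-synchronous reformulation of A's BFS ----
def bfsStepB (u : String) (st : PySem.Dict String Int × List String) (v : String) : PySem.Dict String Int × List String :=
  if st.1.contains v then st else (st.1.insert v (st.1.getD u 0 + 1), st.2 ++ [v])

def expandB (Gd : PySem.Dict String (List String)) : List String → PySem.Dict String Int × List String → Option (PySem.Dict String Int × List String)
  | [], st => some st
  | u :: fr, st =>
    match Gd.get? u with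
    | none => none
    | some adj => expandB Gd fr (adj.foldl (bfsStepB u) st)

def levelGoB (Gd : PySem.Dict String (List String)) (fuel : Nat) (dist : PySem.Dict String Int) (frontier : List String) : Option (PySem.Dict String Int) :=
  if _h : frontier = [] then some dist
  else if _h2 : fuel < frontier.length then none
  else
    match expandB Gd frontier (dist, []) with
    | none => none
    | some st => levelGoB Gd (fuel - frontier.length) st.1 st.2
termination_by fuel
decreasing_by
  have : 0 < frontier.length := List.length_pos_of_ne_nil _h
  omega

-- the inner step only appends to the queue component
lemma foldl_step_append (u : String) : ∀ (adj : List String) (dist : PySem.Dict String Int) (q : List String),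
    ∃ d' ex, adj.foldl (bfsStepA u) (dist, q) = (d', q ++ ex) := by
  intro adj
  induction adj with
  | nil => intro dist q; exact ⟨dist, [], by simp⟩
  | cons v vs ih =>
    intro dist q
    by_cases hv : dist.contains v
    · simpa [List.foldl_cons, bfsStepA, hv] using ih dist q
    · obtain ⟨d', ex, hex⟩ := ih (dist.insert v (dist.getD u 0 + 1)) (q ++ [v])
      exact ⟨d', [v] ++ ex, by simp [List.foldl_cons, bfsStepA, hv, hex]⟩

-- a fixed prefix of the queue component passes through the inner fold unchanged
lemma foldl_step_shift (u : String) : ∀ (adj : List String) (dist : PySem.Dict String Int) (p q : List String),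
    adj.foldl (bfsStepA u) (dist, p ++ q)
      = ((adj.foldl (bfsStepA u) (dist, q)).1, p ++ (adj.foldl (bfsStepA u) (dist, q)).2) := by
  intro adj
  induction adj with
  | nil => intro dist p q; simp
  | cons v vs ih =>
    intro dist p q
    by_cases hv : dist.contains v
    · simp [List.foldl_cons, bfsStepA, hv, ih]
    · simpa [List.foldl_cons, bfsStepA, hv, List.append_assoc] using
        ih (dist.insert v (dist.getD u 0 + 1)) p (q ++ [v])

-- with less fuel than queue elements the queue BFS returns none
lemma bfsGoA_underfuel (Gd : PySem.Dict String (List String)) :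
    ∀ (front : List String) (f : Nat) (rest : List String) (dist : PySem.Dict String Int),
    f < front.length → bfsGoA Gd f dist (front ++ rest) = none := by
  intro front
  induction front with
  | nil => intro f rest dist h; simp at h
  | cons u fr ih =>
    intro f rest dist h
    cases f with
    | zero => simp [bfsGoA]
    | succ f' =>
      simp only [List.cons_append, bfsGoA]
      cases hG : Gd.get? u with
      | none => rfl
      | some adj =>
        dsimp only
        obtain ⟨d', ex, hex⟩ := foldl_step_append u adj dist (fr ++ rest)
        rw [hex, List.append_assoc]
        exact ih f' (rest ++ ex) d' (by simp at h; omega)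

-- peeling a whole frontier off the queue BFS is one expandB step
lemma bfsGoA_peel (Gd : PySem.Dict String (List String)) :
    ∀ (front : List String) (f : Nat) (rest : List String) (dist : PySem.Dict String Int),
    bfsGoA Gd (front.length + f) dist (front ++ rest)
      = match expandB Gd front (dist, rest) with
        | none => none
        | some st => bfsGoA Gd f st.1 st.2 := by
  intro front
  induction front with
  | nil => intro f rest dist; simp [expandB]
  | cons u fr ih =>
    intro f rest dist
    have : fr.length + 1 + f = (fr.length + f) + 1 := by omega
    simp only [List.length_cons, List.cons_append, this, bfsGoA, expandB]
    cases hG : Gd.get? u with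
    | none => rfl
    | some adj =>
      dsimp only
      have hsh := foldl_step_shift u adj dist fr rest
      rw [hsh]
      rw [show (adj.foldl (bfsStepA u) (dist, rest)) = (adj.foldl (bfsStepB u) (dist, rest)) from rfl]
      exact ih f (adj.foldl (bfsStepB u) (dist, rest)).2 (adj.foldl (bfsStepB u) (dist, rest)).1

-- queue BFS and level-synchronous BFS agree at every fuel
lemma bfs_eq (Gd : PySem.Dict String (List String)) :
    ∀ (f : Nat) (dist : PySem.Dict String Int) (front : List String),
    bfsGoA Gd f dist front = levelGoB Gd f dist front := by
  intro f
  induction f using Nat.strong_induction_on with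
  | _ f IH =>
    intro dist front
    rw [levelGoB]
    by_cases hnil : front = []
    · subst hnil; cases f <;> simp [bfsGoA]
    · rw [dif_neg hnil]
      by_cases hf : f < front.length
      · rw [dif_pos hf]
        have := bfsGoA_underfuel Gd front f [] dist hf
        simpa using this
      · rw [dif_neg hf]
        have hpos : 0 < front.length := List.length_pos_of_ne_nil hnil
        have hsplit : f = front.length + (f - front.length) := by omega
        have hpeel := bfsGoA_peel Gd front (f - front.length) [] dist
        rw [List.append_nil] at hpeel
        rw [show bfsGoA Gd f dist front = bfsGoA Gd (front.length + (f - front.length)) dist front by rw [← hsplit]]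
        rw [hpeel]
        cases hE : expandB Gd front (dist, []) with
        | none => rfl
        | some st => exact IH (f - front.length) (by omega) st.1 st.2
-- ---- BFS correctness: the level-synchronous run computes the first-level function ----
def MidInv (Gd : PySem.Dict String (List String)) (s : String) (k : Nat)
    (d : PySem.Dict String Int) (nxt : List String) : Prop :=
  (∀ t, d.contains t = true ↔ (t ∈ rk Gd s k ∨ t ∈ nxt)) ∧
  (∀ t v, d.get? t = some v → (∃ j, j ≤ k ∧ v = (j : Int) ∧ isLvl Gd s j t) ∨ (t ∈ nxt ∧ v = (k : Int) + 1)) ∧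
  nxt.Nodup ∧
  (∀ t ∈ nxt, t ∈ rk Gd s (k + 1) ∧ t ∉ rk Gd s k)

lemma midStep (Gd : PySem.Dict String (List String)) (s : String) (k : Nat) (u v : String)
    (d : PySem.Dict String Int) (nxt : List String)
    (hInv : MidInv Gd s k d nxt) (hu : d.get? u = some (k : Int)) (huk : u ∈ rk Gd s k)
    (hv : v ∈ Gd.getD u []) :
    MidInv Gd s k (bfsStepB u (d, nxt) v).1 (bfsStepB u (d, nxt) v).2 ∧
    (∀ t w, d.get? t = some w → (bfsStepB u (d, nxt) v).1.get? t = some w) ∧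
    (∀ t ∈ nxt, t ∈ (bfsStepB u (d, nxt) v).2) ∧
    ((bfsStepB u (d, nxt) v).1.contains v = true) := by
  obtain ⟨hC, hG, hN, hM⟩ := hInv
  by_cases hc : d.contains v
  · have hred : bfsStepB u (d, nxt) v = (d, nxt) := by simp [bfsStepB, hc]
    rw [hred]
    exact ⟨⟨hC, hG, hN, hM⟩, fun t w h => h, fun t h => h, hc⟩
  · have hred : bfsStepB u (d, nxt) v = (d.insert v (d.getD u 0 + 1), nxt ++ [v]) := by
      simp [bfsStepB, hc]
    rw [hred]
    have hgetD : d.getD u 0 = (k : Int) := PySem.Dict.getD_of_get?_eq_some d 0 hu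
    have hvrk : v ∉ rk Gd s k := fun h => hc (hC v |>.mpr (Or.inl h))
    have hvnxt : v ∉ nxt := fun h => hc (hC v |>.mpr (Or.inr h))
    have hvsucc : v ∈ rk Gd s (k + 1) := (mem_rk_succ Gd s k v).mpr (Or.inr ⟨u, huk, hv⟩)
    have hpres : ∀ t w, d.get? t = some w → (d.insert v (d.getD u 0 + 1)).get? t = some w := by
      intro t w h
      have htv : t ≠ v := by
        intro he; subst he
        rw [PySem.Dict.contains_eq_isSome_get?, h] at hc
        simp at hc
      rw [PySem.Dict.get?_insert_of_ne d _ htv]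
      exact h
    refine ⟨⟨?_, ?_, ?_, ?_⟩, hpres, fun t h => by simp [h], by simp⟩
    · intro t
      rw [PySem.Dict.contains_insert]
      by_cases htv : t = v
      · subst htv; simp
      · simp only [List.mem_append, List.mem_singleton]
        constructor
        · intro h
          rcases Bool.or_eq_true_iff.mp h with h | h
          · exact absurd (by simpa using h) htv
          · rcases (hC t).mp h with h' | h' <;> simp [h']
        · intro h
          rcases h with h | h | h
          · simp [(hC t).mpr (Or.inl h)]
          · simp [(hC t).mpr (Or.inr h)]
          · exact absurd h htv
    · intro t w h
      by_cases htv : t = v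
      · subst htv
        rw [PySem.Dict.get?_insert_self] at h
        refine Or.inr ⟨by simp, ?_⟩
        rw [← Option.some_inj.mp h, hgetD]
      · rw [PySem.Dict.get?_insert_of_ne d _ htv] at h
        rcases hG t w h with h' | ⟨h1, h2⟩
        · exact Or.inl h'
        · exact Or.inr ⟨by simp [h1], h2⟩
    · rw [List.nodup_append]
      exact ⟨hN, List.nodup_singleton v, fun a ha b hb => by
        simp only [List.mem_singleton] at hb; subst hb; exact fun he => hvnxt (he ▸ ha)⟩
    · intro t ht
      rcases List.mem_append.mp ht with ht | ht
      · exact hM t ht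
      · rw [List.mem_singleton] at ht; subst ht
        exact ⟨hvsucc, hvrk⟩

lemma midFold (Gd : PySem.Dict String (List String)) (s : String) (k : Nat) (u : String) :
    ∀ (adj : List String) (d : PySem.Dict String Int) (nxt : List String),
    MidInv Gd s k d nxt → d.get? u = some (k : Int) → u ∈ rk Gd s k →
    (∀ v ∈ adj, v ∈ Gd.getD u []) →
    MidInv Gd s k (adj.foldl (bfsStepB u) (d, nxt)).1 (adj.foldl (bfsStepB u) (d, nxt)).2 ∧
    (∀ t w, d.get? t = some w → (adj.foldl (bfsStepB u) (d, nxt)).1.get? t = some w) ∧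
    (∀ t ∈ nxt, t ∈ (adj.foldl (bfsStepB u) (d, nxt)).2) ∧
    (∀ v ∈ adj, (adj.foldl (bfsStepB u) (d, nxt)).1.contains v = true) := by
  intro adj
  induction adj with
  | nil => intro d nxt hInv _ _ _; exact ⟨hInv, fun t w h => h, fun t h => h, by simp⟩
  | cons v vs ih =>
    intro d nxt hInv hu huk hadj
    obtain ⟨hInv1, hpres1, hmem1, hcv⟩ :=
      midStep Gd s k u v d nxt hInv hu huk (hadj v (by simp))
    set st1 := bfsStepB u (d, nxt) v with hst1
    obtain ⟨hInv2, hpres2, hmem2, hcov2⟩ :=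
      ih st1.1 st1.2 hInv1 (hpres1 u _ hu) huk (fun w hw => hadj w (by simp [hw]))
    have hfold : (v :: vs).foldl (bfsStepB u) (d, nxt) = vs.foldl (bfsStepB u) st1 := by
      simp [hst1]
    rw [hfold]
    refine ⟨hInv2, fun t w h => hpres2 t w (hpres1 t w h), fun t h => hmem2 t (hmem1 t h), ?_⟩
    intro w hw
    rcases List.mem_cons.mp hw with rfl | hw
    · rw [PySem.Dict.contains_eq_isSome_get?] at hcv ⊢
      obtain ⟨x, hx⟩ := Option.isSome_iff_exists.mp hcv
      rw [hpres2 w x hx]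
      rfl
    · exact hcov2 w hw

lemma expand_run (Gd : PySem.Dict String (List String)) (s : String) (k : Nat) :
    ∀ (fr : List String) (d : PySem.Dict String Int) (nxt : List String),
    MidInv Gd s k d nxt →
    (∀ u ∈ fr, d.get? u = some (k : Int)) → (∀ u ∈ fr, u ∈ rk Gd s k) →
    (∀ u ∈ fr, u ∈ Gd.keys) →
    ∃ st, expandB Gd fr (d, nxt) = some st ∧ MidInv Gd s k st.1 st.2 ∧
      (∀ t w, d.get? t = some w → st.1.get? t = some w) ∧
      (∀ t ∈ nxt, t ∈ st.2) ∧
      (∀ t, (∃ u ∈ fr, t ∈ Gd.getD u []) → st.1.contains t = true) := by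
  intro fr
  induction fr with
  | nil =>
    intro d nxt hInv _ _ _
    exact ⟨(d, nxt), rfl, hInv, fun t w h => h, fun t h => h, by simp⟩
  | cons u fr ih =>
    intro d nxt hInv hval hrk hkeys
    have hu : u ∈ Gd.keys := hkeys u (by simp)
    have hcont : Gd.contains u = true := (PySem.Dict.contains_iff_mem_keys Gd u).mpr hu
    obtain ⟨adj, hadj⟩ : ∃ adj, Gd.get? u = some adj := by
      rcases h : Gd.get? u with _ | adj
      · rw [PySem.Dict.contains_eq_isSome_get?, h] at hcont; simp at hcont
      · exact ⟨adj, rfl⟩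
    have hgetD : Gd.getD u [] = adj := by
      rw [PySem.Dict.getD_eq_get?_getD, hadj]; rfl
    obtain ⟨hInv1, hpres1, hmem1, hcov1⟩ :=
      midFold Gd s k u adj d nxt hInv (hval u (by simp)) (hrk u (by simp))
        (fun v hv => hgetD ▸ hv)
    set st1 := adj.foldl (bfsStepB u) (d, nxt) with hst1
    obtain ⟨st, hst, hInv2, hpres2, hmem2, hcov2⟩ :=
      ih st1.1 st1.2 hInv1 (fun w hw => hpres1 w _ (hval w (by simp [hw])))
        (fun w hw => hrk w (by simp [hw])) (fun w hw => hkeys w (by simp [hw]))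
    refine ⟨st, ?_, hInv2, fun t w h => hpres2 t w (hpres1 t w h),
      fun t h => hmem2 t (hmem1 t h), ?_⟩
    · simp only [expandB, hadj]
      exact hst
    · intro t ⟨u', hu', htu'⟩
      rcases List.mem_cons.mp hu' with rfl | hu'
      · have : st1.1.contains t = true := hcov1 t (hgetD ▸ htu')
        rw [PySem.Dict.contains_eq_isSome_get?] at this ⊢
        obtain ⟨x, hx⟩ := Option.isSome_iff_exists.mp this
        rw [hpres2 t x hx]; rfl
      · exact hcov2 t ⟨u', hu', htu'⟩

def LInv (Gd : PySem.Dict String (List String)) (s : String) (k : Nat)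
    (dist : PySem.Dict String Int) (fr : List String) : Prop :=
  (∀ t v, dist.get? t = some v ↔ ∃ j, j ≤ k ∧ v = (j : Int) ∧ isLvl Gd s j t) ∧
  fr.Nodup ∧ (∀ t, t ∈ fr ↔ isLvl Gd s k t)

lemma LInv_contains (Gd : PySem.Dict String (List String)) (s : String) (k : Nat)
    (dist : PySem.Dict String Int) (fr : List String) (h : LInv Gd s k dist fr) :
    ∀ t, dist.contains t = true ↔ t ∈ rk Gd s k := by
  intro t
  rw [PySem.Dict.contains_eq_isSome_get?, Option.isSome_iff_exists]
  constructor
  · intro ⟨v, hv⟩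
    obtain ⟨j, hj, _, hLvl⟩ := (h.1 t v).mp hv
    exact rk_mono Gd s hj hLvl.1
  · intro ht
    obtain ⟨j, hj, hLvl⟩ := exists_isLvl Gd s ht
    exact ⟨(j : Int), (h.1 t (j : Int)).mpr ⟨j, hj, rfl, hLvl⟩⟩

lemma LInv_expand (Gd : PySem.Dict String (List String)) (s : String) (k : Nat)
    (dist : PySem.Dict String Int) (fr : List String)
    (h : LInv Gd s k dist fr) (hkeys : ∀ m, ∀ t ∈ rk Gd s m, t ∈ Gd.keys) :
    ∃ st, expandB Gd fr (dist, []) = some st ∧ LInv Gd s (k + 1) st.1 st.2 ∧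
      st.2.toFinset = rk Gd s (k + 1) \ rk Gd s k := by
  have hMid : MidInv Gd s k dist [] := by
    refine ⟨fun t => by simpa using LInv_contains Gd s k dist fr h t,
      fun t v hv => Or.inl ((h.1 t v).mp hv), by simp, by simp⟩
  obtain ⟨st, hst, hInv, hpres, _, hcov⟩ :=
    expand_run Gd s k fr dist [] hMid
      (fun u hu => (h.1 u (k : Int)).mpr ⟨k, le_refl k, rfl, (h.2.2 u).mp hu⟩)
      (fun u hu => ((h.2.2 u).mp hu).1)
      (fun u hu => hkeys k u ((h.2.2 u).mp hu).1)
  obtain ⟨hC, hG, hN, hM⟩ := hInv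
  have hlvl_of_mem : ∀ t ∈ st.2, isLvl Gd s (k + 1) t := by
    intro t ht
    obtain ⟨h1, h2⟩ := hM t ht
    exact ⟨h1, fun i hi hti => h2 (rk_mono Gd s (Nat.lt_succ_iff.mp hi) hti)⟩
  have hmem_of_lvl : ∀ t, isLvl Gd s (k + 1) t → st.1.get? t = some ((k : Int) + 1) ∧ t ∈ st.2 := by
    intro t hLvl
    obtain ⟨u, huLvl, htu⟩ := lvl_succ_witness Gd s hLvl
    have hufr : u ∈ fr := (h.2.2 u).mpr huLvl
    have hcont : st.1.contains t = true := hcov t ⟨u, hufr, htu⟩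
    rw [PySem.Dict.contains_eq_isSome_get?] at hcont
    obtain ⟨v, hv⟩ := Option.isSome_iff_exists.mp hcont
    rcases hG t v hv with ⟨j, hj, _, hLvl'⟩ | ⟨h1, h2⟩
    · exact absurd (isLvl_unique Gd s hLvl hLvl') (by omega)
    · exact ⟨by rw [hv, h2], h1⟩
  refine ⟨st, hst, ⟨?_, hN, ?_⟩, ?_⟩
  · intro t v
    constructor
    · intro hv
      rcases hG t v hv with ⟨j, hj, hvj, hLvl⟩ | ⟨h1, h2⟩
      · exact ⟨j, Nat.le_succ_of_le hj, hvj, hLvl⟩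
      · exact ⟨k + 1, le_refl _, by push_cast [h2]; ring, hlvl_of_mem t h1⟩
    · intro ⟨j, hj, hvj, hLvl⟩
      rcases Nat.lt_succ_iff_lt_or_eq.mp (Nat.lt_succ_of_le hj) with hj' | rfl
      · exact hpres t v (by rw [(h.1 t v)]; exact ⟨j, Nat.lt_succ_iff.mp hj', hvj, hLvl⟩)
      · rw [hvj]
        have := (hmem_of_lvl t hLvl).1
        rw [this]
        norm_num
  · intro t
    constructor
    · exact hlvl_of_mem t
    · intro hLvl
      exact (hmem_of_lvl t hLvl).2
  · ext t
    simp only [List.mem_toFinset, Finset.mem_sdiff]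
    constructor
    · intro ht; exact (hM t ht)
    · intro ⟨h1, h2⟩
      refine (hmem_of_lvl t ⟨h1, fun i hi hti => h2 (rk_mono Gd s (Nat.lt_succ_iff.mp hi) hti)⟩).2

lemma no_lvl_above (Gd : PySem.Dict String (List String)) (s : String) (k : Nat)
    (h : ∀ x, ¬ isLvl Gd s k x) : ∀ m x, ¬ isLvl Gd s (k + m) x := by
  intro m
  induction m with
  | zero => exact h
  | succ m ih =>
    intro x hx
    obtain ⟨u, hu, _⟩ := lvl_succ_witness Gd s (by rwa [show k + (m+1) = (k + m) + 1 by ring] at hx)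
    exact ih u hu

lemma levelGo_run (Gd : PySem.Dict String (List String)) (s : String)
    (hkeys : ∀ m, ∀ t ∈ rk Gd s m, t ∈ Gd.keys) :
    ∀ (fuel : Nat) (k : Nat) (dist : PySem.Dict String Int) (fr : List String),
    LInv Gd s k dist fr →
    (Gd.keys.toFinset.card - (rk Gd s k).card) + fr.length ≤ fuel →
    ∃ dfin, levelGoB Gd fuel dist fr = some dfin ∧
      ∀ t v, dfin.get? t = some v ↔ ∃ j : Nat, v = (j : Int) ∧ isLvl Gd s j t := by
  intro fuel
  induction fuel using Nat.strong_induction_on with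
  | _ fuel IH =>
    intro k dist fr hInv hfuel
    rw [levelGoB]
    by_cases hnil : fr = []
    · subst hnil
      rw [dif_pos rfl]
      refine ⟨dist, rfl, fun t v => ?_⟩
      rw [hInv.1 t v]
      constructor
      · intro ⟨j, _, hvj, hLvl⟩; exact ⟨j, hvj, hLvl⟩
      · intro ⟨j, hvj, hLvl⟩
        refine ⟨j, ?_, hvj, hLvl⟩
        by_contra hc
        have hempty : ∀ x, ¬ isLvl Gd s k x := fun x hx => by
          simpa using (hInv.2.2 x).mpr hx
        exact no_lvl_above Gd s k hempty (j - k)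
          t (by rwa [show k + (j - k) = j by omega])
    · rw [dif_neg hnil]
      have hlen : 0 < fr.length := List.length_pos_of_ne_nil hnil
      rw [dif_neg (by omega)]
      obtain ⟨st, hst, hInv', hfr'⟩ := LInv_expand Gd s k dist fr hInv hkeys
      rw [hst]
      have hsub1 : rk Gd s k ⊆ rk Gd s (k + 1) := rk_mono_succ Gd s k
      have hsub2 : rk Gd s (k + 1) ⊆ Gd.keys.toFinset :=
        fun t ht => List.mem_toFinset.mpr (hkeys (k + 1) t ht)
      have hcard1 : (rk Gd s k).card ≤ (rk Gd s (k + 1)).card := Finset.card_le_card hsub1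
      have hcard2 : (rk Gd s (k + 1)).card ≤ Gd.keys.toFinset.card := Finset.card_le_card hsub2
      have hlen' : st.2.length = (rk Gd s (k + 1)).card - (rk Gd s k).card := by
        rw [← List.toFinset_card_of_nodup hInv'.2.1, hfr',
          Finset.card_sdiff, Finset.inter_eq_left.mpr hsub1]
      exact IH (fuel - fr.length) (by omega) (k + 1) st.1 st.2 hInv' (by omega)
-- ---- Bellman-Ford side: the relaxation table computes the same first-level function ----

lemma foldl_pres {α β : Type} (P : α → Prop) (f : α → β → α) (L : List β)
    (h : ∀ a b, b ∈ L → P a → P (f a b)) : ∀ a, P a → P (L.foldl f a) := by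
  induction L with
  | nil => intro a ha; exact ha
  | cons x xs ih =>
    intro a ha
    exact ih (fun a b hb => h a b (by simp [hb])) (f a x) (h a x (by simp) ha)

-- the initial table {(s, s): 0 for s in nodes}
lemma dist0_get? (nodes : List String) :
    ∀ (d : PySem.Dict (String × String) Int) (p : String × String),
    (nodes.foldl (fun d s => d.insert (s, s) (0 : Int)) d).get? p
      = if p.1 = p.2 ∧ p.1 ∈ nodes then some 0 else d.get? p := by
  induction nodes with
  | nil => intro d p; simp
  | cons s ns ih =>
    intro d p
    rw [List.foldl_cons, ih]
    rcases p with ⟨a, b⟩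
    by_cases h1 : a = b ∧ a ∈ ns
    · rw [if_pos (by exact h1), if_pos ⟨h1.1, List.mem_cons_of_mem s h1.2⟩]
    · rw [if_neg (by exact h1), PySem.Dict.get?_insert]
      by_cases h2 : (a, b) = (s, s)
      · obtain ⟨rfl, rfl⟩ : a = s ∧ b = s := Prod.mk.injEq .. ▸ Prod.ext_iff.mp h2
        rw [if_pos rfl, if_pos ⟨rfl, by simp⟩]
      · rw [if_neg h2, if_neg ?_]
        intro hcond
        obtain ⟨hab, hmem⟩ := hcond
        dsimp only at hab hmem
        rcases List.mem_cons.mp hmem with rfl | hmem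
        · exact h2 (by rw [← hab])
        · exact h1 ⟨hab, hmem⟩

-- values in the table only appear or decrease
def DMono (d1 d2 : PySem.Dict (String × String) Int) : Prop :=
  ∀ p v, d1.get? p = some v → ∃ w, d2.get? p = some w ∧ w ≤ v

lemma DMono_refl (d : PySem.Dict (String × String) Int) : DMono d d :=
  fun p v h => ⟨v, h, le_refl v⟩

lemma DMono_trans {d1 d2 d3 : PySem.Dict (String × String) Int}
    (h1 : DMono d1 d2) (h2 : DMono d2 d3) : DMono d1 d3 := by
  intro p v h
  obtain ⟨w, hw, hwv⟩ := h1 p v h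
  obtain ⟨x, hx, hxw⟩ := h2 p w hw
  exact ⟨x, hx, le_trans hxw hwv⟩

lemma relax_DMono (u v : String) (d : PySem.Dict (String × String) Int) (s : String) :
    DMono d (relaxB u v d s) := by
  unfold relaxB
  rcases hu : d.get? (s, u) with _ | du
  · exact DMono_refl d
  dsimp only
  rcases hv : d.get? (s, v) with _ | dv
  · intro p w h
    have hp : p ≠ (s, v) := fun he => by rw [he, hv] at h; cases h
    exact ⟨w, by rw [PySem.Dict.get?_insert_of_ne d _ hp]; exact h, le_refl w⟩
  dsimp only
  by_cases hlt : du + 1 < dv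
  · rw [if_pos hlt]
    intro p w h
    by_cases hp : p = (s, v)
    · subst hp
      rw [hv] at h
      have hw := Option.some_inj.mp h
      exact ⟨du + 1, by rw [PySem.Dict.get?_insert_self], by omega⟩
    · exact ⟨w, by rw [PySem.Dict.get?_insert_of_ne d _ hp]; exact h, le_refl w⟩
  · rw [if_neg hlt]; exact DMono_refl d

lemma fold_DMono {β : Type} (f : PySem.Dict (String × String) Int → β → PySem.Dict (String × String) Int)
    (h : ∀ d b, DMono d (f d b)) (L : List β) (d : PySem.Dict (String × String) Int) :
    DMono d (L.foldl f d) := by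
  induction L generalizing d with
  | nil => exact DMono_refl d
  | cons x xs ih => exact DMono_trans (h d x) (ih (f d x))

lemma round_DMono (nodes : List String) (items : List (String × List String))
    (d : PySem.Dict (String × String) Int) : DMono d (roundB nodes items d) := by
  unfold roundB
  refine fold_DMono _ (fun d q => ?_) items d
  refine fold_DMono _ (fun d v => ?_) q.2 d
  exact fold_DMono _ (fun d s => relax_DMono q.1 v d s) nodes d

-- soundness: every table entry is the length of some reach chain
def SoundBF (Gd : PySem.Dict String (List String)) (d : PySem.Dict (String × String) Int) : Prop :=
  ∀ s t (v : Int), d.get? (s, t) = some v → ∃ j : Nat, v = (j : Int) ∧ t ∈ rk Gd s j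

lemma sound_relax (Gd : PySem.Dict String (List String)) (u v : String)
    (d : PySem.Dict (String × String) Int) (s : String)
    (hv : v ∈ Gd.getD u []) (hS : SoundBF Gd d) : SoundBF Gd (relaxB u v d s) := by
  unfold relaxB
  rcases hu : d.get? (s, u) with _ | du
  · exact hS
  dsimp only
  have hins : SoundBF Gd (d.insert (s, v) (du + 1)) := by
    intro s' t' w h
    by_cases hp : (s', t') = (s, v)
    · obtain ⟨rfl, rfl⟩ := Prod.mk.injEq .. ▸ Prod.ext_iff.mp hp
      rw [PySem.Dict.get?_insert_self] at h
      obtain ⟨j, hj, hrk⟩ := hS s u du hu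
      refine ⟨j + 1, by rw [← Option.some_inj.mp h, hj]; push_cast; ring, ?_⟩
      exact (mem_rk_succ Gd s j v).mpr (Or.inr ⟨u, hrk, hv⟩)
    · rw [PySem.Dict.get?_insert_of_ne d _ hp] at h
      exact hS s' t' w h
  rcases hvv : d.get? (s, v) with _ | dv
  · exact hins
  dsimp only
  by_cases hlt : du + 1 < dv
  · rw [if_pos hlt]; exact hins
  · rw [if_neg hlt]; exact hS

lemma sound_round (Gd : PySem.Dict String (List String)) (hnd : Gd.keys.Nodup)
    (nodes : List String) (d : PySem.Dict (String × String) Int)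
    (hS : SoundBF Gd d) : SoundBF Gd (roundB nodes Gd.items d) := by
  unfold roundB
  refine foldl_pres (SoundBF Gd) _ Gd.items (fun d p hp hS => ?_) d hS
  refine foldl_pres (SoundBF Gd) _ p.2 (fun d v hv hS => ?_) d hS
  refine foldl_pres (SoundBF Gd) _ nodes (fun d s _ hS => ?_) d hS
  have hpv : v ∈ Gd.getD p.1 [] := by
    have hp' : (p.1, p.2) ∈ Gd.items := by simpa using hp
    rw [PySem.Dict.getD_of_mem_items Gd hp' hnd []]
    exact hv
  exact sound_relax Gd p.1 v d s hpv hS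

-- flattened triple list of one round
def trips (nodes : List String) (items : List (String × List String)) : List (String × String × String) :=
  items.flatMap (fun p => p.2.flatMap (fun v => nodes.map (fun s => (p.1, v, s))))

def step3 (d : PySem.Dict (String × String) Int) (x : String × String × String) : PySem.Dict (String × String) Int :=
  relaxB x.1 x.2.1 d x.2.2

lemma round_eq_trips (nodes : List String) (items : List (String × List String))
    (d : PySem.Dict (String × String) Int) :
    roundB nodes items d = (trips nodes items).foldl step3 d := by
  unfold roundB trips
  rw [List.foldl_flatMap]
  congr 1
  funext acc p
  rw [List.foldl_flatMap]
  congr 1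
  funext acc2 v
  rw [List.foldl_map]
  rfl

lemma mem_trips (nodes : List String) (items : List (String × List String))
    {u v s : String} {adj : List String}
    (h1 : (u, adj) ∈ items) (h2 : v ∈ adj) (h3 : s ∈ nodes) :
    (u, v, s) ∈ trips nodes items := by
  unfold trips
  rw [List.mem_flatMap]
  exact ⟨(u, adj), h1, by rw [List.mem_flatMap]; exact ⟨v, h2, List.mem_map.mpr ⟨s, h3, rfl⟩⟩⟩

lemma relax_le_target (u v : String) (d : PySem.Dict (String × String) Int) (s : String)
    {du : Int} (hu : d.get? (s, u) = some du) :
    ∃ w, (relaxB u v d s).get? (s, v) = some w ∧ w ≤ du + 1 := by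
  unfold relaxB
  rw [hu]
  dsimp only
  rcases hvv : d.get? (s, v) with _ | dv
  · exact ⟨du + 1, by rw [PySem.Dict.get?_insert_self], le_refl _⟩
  dsimp only
  by_cases hlt : du + 1 < dv
  · rw [if_pos hlt]
    exact ⟨du + 1, by rw [PySem.Dict.get?_insert_self], le_refl _⟩
  · rw [if_neg hlt]
    exact ⟨dv, hvv, by omega⟩

lemma step3_DMono : ∀ (d : PySem.Dict (String × String) Int) (x : String × String × String), DMono d (step3 d x) :=
  fun d x => relax_DMono x.1 x.2.1 d x.2.2

lemma fold_relax_le (L : List (String × String × String)) {u v s : String}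
    (d : PySem.Dict (String × String) Int) {du : Int}
    (hmem : (u, v, s) ∈ L) (hu : d.get? (s, u) = some du) :
    ∃ w, (L.foldl step3 d).get? (s, v) = some w ∧ w ≤ du + 1 := by
  obtain ⟨L1, L2, rfl⟩ := List.append_of_mem hmem
  rw [List.foldl_append, List.foldl_cons]
  obtain ⟨du', hdu', hle'⟩ := fold_DMono step3 step3_DMono L1 d (s, u) du hu
  obtain ⟨w', hw', hlew'⟩ := relax_le_target u v (L1.foldl step3 d) s hdu'
  obtain ⟨w, hw, hlew⟩ := fold_DMono step3 step3_DMono L2 _ (s, v) w' hw'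
  exact ⟨w, hw, by omega⟩

-- completeness after r rounds
lemma rounds_complete (Gd : PySem.Dict String (List String)) (_hnd : Gd.keys.Nodup)
    (nodes : List String) (s : String) (hs : s ∈ nodes)
    (hkeys : ∀ m, ∀ t ∈ rk Gd s m, t ∈ Gd.keys) :
    ∀ (r : Nat) (j : Nat), j ≤ r → ∀ t ∈ rk Gd s j,
    ∃ w, (((List.range r).foldl (fun d _ => roundB nodes Gd.items d)
        (nodes.foldl (fun d x => d.insert (x, x) (0 : Int)) PySem.Dict.empty)).get? (s, t) = some w) ∧ w ≤ (j : Int) := by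
  intro r
  induction r with
  | zero =>
    intro j hj t ht
    have hj0 : j = 0 := Nat.le_zero.mp hj
    subst hj0
    rw [rk_zero] at ht
    have ht' : t = s := Finset.mem_singleton.mp ht
    subst ht'
    refine ⟨0, ?_, le_refl _⟩
    simp only [List.range_zero, List.foldl_nil]
    rw [dist0_get? nodes PySem.Dict.empty (t, t)]
    simp [hs]
  | succ r ih =>
    intro j hj t ht
    rw [List.range_succ, List.foldl_append, List.foldl_cons, List.foldl_nil]
    set D := (List.range r).foldl (fun d _ => roundB nodes Gd.items d)
      (nodes.foldl (fun d x => d.insert (x, x) (0 : Int)) PySem.Dict.empty) with hD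
    rcases Nat.lt_succ_iff_lt_or_eq.mp (Nat.lt_succ_of_le hj) with hj' | rfl
    · obtain ⟨w, hw, hle⟩ := ih j (Nat.lt_succ_iff.mp hj') t ht
      obtain ⟨w', hw', hle'⟩ := round_DMono nodes Gd.items D (s, t) w hw
      exact ⟨w', hw', le_trans hle' hle⟩
    · rcases (mem_rk_succ Gd s r t).mp ht with ht' | ⟨u, hu, htu⟩
      · obtain ⟨w, hw, hle⟩ := ih r (le_refl r) t ht'
        obtain ⟨w', hw', hle'⟩ := round_DMono nodes Gd.items D (s, t) w hw
        exact ⟨w', hw', by push_cast; omega⟩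
      · obtain ⟨du, hdu, hledu⟩ := ih r (le_refl r) u hu
        have hukey : u ∈ Gd.keys := hkeys r u hu
        obtain ⟨adj, hadj⟩ : ∃ adj, Gd.get? u = some adj := by
          rcases h : Gd.get? u with _ | adj
          · rw [PySem.Dict.get?_eq_none_iff_not_mem_keys] at h
            exact absurd hukey h
          · exact ⟨adj, rfl⟩
        have hitems : (u, adj) ∈ Gd.items := PySem.Dict.mem_items_of_get?_eq_some Gd hadj
        have htadj : t ∈ adj := by
          rw [PySem.Dict.getD_eq_get?_getD, hadj] at htu
          exact htu
        rw [round_eq_trips]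
        obtain ⟨w, hw, hlew⟩ := fold_relax_le (trips nodes Gd.items) D
          (mem_trips nodes Gd.items hitems htadj hs) hdu
        exact ⟨w, hw, by push_cast; omega⟩

-- a first level is below the number of keys
lemma lvl_lt_size (Gd : PySem.Dict String (List String)) (hnd : Gd.keys.Nodup) (s : String)
    (hkeys : ∀ m, ∀ t ∈ rk Gd s m, t ∈ Gd.keys) {j : Nat} {t : String}
    (hLvl : isLvl Gd s j t) : j < Gd.size := by
  have hstrict : ∀ i, i < j → rk Gd s (i + 1) ≠ rk Gd s i := by
    intro i hij heq
    have := rk_stab Gd s heq j (Nat.le_of_lt hij)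
    exact hLvl.2 i hij (this ▸ hLvl.1)
  have hcard := card_rk_of_strict Gd s j hstrict
  have hsub : rk Gd s j ⊆ Gd.keys.toFinset :=
    fun x hx => List.mem_toFinset.mpr (hkeys j x hx)
  have hcard2 := Finset.card_le_card hsub
  have hkl : Gd.keys.toFinset.card = Gd.size := by
    rw [List.toFinset_card_of_nodup hnd]
    simp [PySem.Dict.keys, PySem.Dict.size]
  omega

-- sound through all rounds
lemma sound_final (Gd : PySem.Dict String (List String)) (hnd : Gd.keys.Nodup)
    (nodes : List String) (r : Nat) :
    SoundBF Gd ((List.range r).foldl (fun d _ => roundB nodes Gd.items d)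
      (nodes.foldl (fun d x => d.insert (x, x) (0 : Int)) PySem.Dict.empty)) := by
  have h0 : SoundBF Gd (nodes.foldl (fun d x => d.insert (x, x) (0 : Int)) PySem.Dict.empty) := by
    intro s t v h
    rw [dist0_get? nodes PySem.Dict.empty (s, t)] at h
    by_cases hc : s = t ∧ s ∈ nodes
    · rw [if_pos hc] at h
      refine ⟨0, ?_, ?_⟩
      · have := Option.some_inj.mp h
        simp [← this]
      · rw [rk_zero]
        exact Finset.mem_singleton.mpr hc.1.symm
    · rw [if_neg hc] at h
      rw [PySem.Dict.get?_empty] at h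
      cases h
  exact foldl_pres (SoundBF Gd) _ (List.range r)
    (fun d _ _ hS => sound_round Gd hnd nodes d hS) _ h0

-- the final table value at (s, t) is exactly t's first level
lemma bf_value (Gd : PySem.Dict String (List String)) (hnd : Gd.keys.Nodup)
    (nodes : List String) (s : String) (hs : s ∈ nodes)
    (hkeys : ∀ m, ∀ t ∈ rk Gd s m, t ∈ Gd.keys) {j : Nat} {t : String}
    (hLvl : isLvl Gd s j t) :
    ((List.range Gd.size).foldl (fun d _ => roundB nodes Gd.items d)
      (nodes.foldl (fun d x => d.insert (x, x) (0 : Int)) PySem.Dict.empty)).get? (s, t) = some (j : Int) := by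
  have hjs : j < Gd.size := lvl_lt_size Gd hnd s hkeys hLvl
  obtain ⟨w, hw, hle⟩ := rounds_complete Gd hnd nodes s hs hkeys Gd.size j (Nat.le_of_lt hjs) t hLvl.1
  obtain ⟨j', hj', hrk'⟩ := sound_final Gd hnd nodes Gd.size s t w hw
  have hjj' : j ≤ j' := isLvl_le_of_mem Gd s hLvl hrk'
  have : w = (j : Int) := by
    rw [hj']
    have : (j : Int) ≤ (j' : Int) := by exact_mod_cast hjj'
    rw [hj'] at hle
    omega
  rw [hw, this]
-- ---- assembling the output rows: A's per-element appends vs B's row lists ----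

-- the list of entries A's inner loop appends for source s
def entriesA (d : PySem.Dict String Int) (s : String) : List String → Option (List (String × Int))
  | [] => some []
  | t :: ts =>
    if t = s ∨ t = "AA" then entriesA d s ts
    else
      match d.get? t with
      | none => none
      | some dt =>
        match entriesA d s ts with
        | none => none
        | some l => some ((t, dt + 1) :: l)

-- inserting back a key's own value is the identity (keys unique)
lemma insert_getD_self (d : PySem.Dict String (List (String × Int))) (s : String)
    (hnd : d.keys.Nodup) (hs : d.contains s = true) :
    d.insert s (d.getD s []) = d := by
  apply PySem.Dict.ext
  simp only [PySem.Dict.insert, hs, if_pos]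
  conv_rhs => rw [← List.map_id d.items]
  apply List.map_congr_left
  intro p hp
  by_cases hb : p.1 = s
  · have hval : d.getD p.1 [] = p.2 := PySem.Dict.getD_of_mem_items d (k := p.1) (v := p.2) (by simpa using hp) hnd []
    simp only [hb] at hval
    rw [hval, ← hb]
    simp
  · simp [hb]

-- two appends onto the same row compose
lemma modify_append_append (GG : PySem.Dict String (List (String × Int))) (s : String)
    (e : String × Int) (l : List (String × Int)) :
    (GG.modify s [] (fun r => r ++ [e])).modify s [] (fun r => r ++ l)
      = GG.modify s [] (fun r => r ++ (e :: l)) := by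
  simp [PySem.Dict.modify, PySem.Dict.getD_insert_self, PySem.Dict.insert_insert_self]

-- A's element-by-element row appends equal a one-shot row extension
lemma row_entries (d : PySem.Dict String Int) (s : String) :
    ∀ (ts : List String) (GG : PySem.Dict String (List (String × Int))),
    GG.keys.Nodup → GG.contains s = true →
    rowA d s GG ts
      = match entriesA d s ts with
        | none => none
        | some l => some (GG.modify s [] (fun r => r ++ l)) := by
  intro ts
  induction ts with
  | nil =>
    intro GG hnd hs
    simp [rowA, entriesA, PySem.Dict.modify, insert_getD_self GG s hnd hs]
  | cons t ts ih =>
    intro GG hnd hs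
    by_cases hskip : t = s ∨ t = "AA"
    · simp only [rowA, entriesA, if_pos hskip]
      exact ih GG hnd hs
    · simp only [rowA, entriesA, if_neg hskip]
      cases hd : d.get? t with
      | none => rfl
      | some dt =>
        dsimp only
        have hnd' : (GG.modify s [] (fun l => l ++ [(t, dt + 1)])).keys.Nodup := by
          simpa [PySem.Dict.modify] using PySem.Dict.nodup_keys_insert _ _ _ hnd
        have hs' : (GG.modify s [] (fun l => l ++ [(t, dt + 1)])).contains s = true := by
          simp [PySem.Dict.modify]
        rw [ih _ hnd' hs']
        cases hE : entriesA d s ts with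
        | none => rfl
        | some l => dsimp only; rw [modify_append_append]

-- equal lookups give equal rows
lemma entries_eq_row (d : PySem.Dict String Int) (DF : PySem.Dict (String × String) Int) (s : String) :
    ∀ (ts : List String),
    (∀ t ∈ ts, t ≠ s → t ≠ "AA" → d.get? t = DF.get? (s, t)) →
    entriesA d s ts = rowB DF s ts := by
  intro ts
  induction ts with
  | nil => intro _; rfl
  | cons t ts ih =>
    intro hpt
    by_cases hskip : t = s ∨ t = "AA"
    · simp only [entriesA, rowB, if_pos hskip]
      exact ih (fun x hx => hpt x (by simp [hx]))
    · push Not at hskip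
      simp only [entriesA, rowB, if_neg (not_or.mpr hskip)]
      rw [← hpt t (by simp) hskip.1 hskip.2, ih (fun x hx => hpt x (by simp [hx]))]

-- the outer loops agree row by row
lemma outer_eq_assemble (Gd : PySem.Dict String (List String)) (fuel : Nat)
    (DF : PySem.Dict (String × String) Int) (nodes : List String) :
    ∀ (ss : List String) (GG : PySem.Dict String (List (String × Int))),
    GG.keys.Nodup → (∀ x ∈ ss, GG.contains x = true) →
    (∀ s ∈ ss, ∃ d, bfsGoA Gd fuel ((PySem.Dict.empty).insert s 0) [s] = some d ∧
      entriesA d s nodes = rowB DF s nodes) →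
    outerA Gd fuel nodes ss GG = assembleB DF nodes ss GG := by
  intro ss
  induction ss with
  | nil => intro GG _ _ _; rfl
  | cons s ss ih =>
    intro GG hnd hc hrun
    obtain ⟨d, hd, hrow⟩ := hrun s (by simp)
    simp only [outerA, assembleB, hd]
    rw [row_entries d s nodes GG hnd (hc s (by simp)), hrow]
    cases hE : rowB DF s nodes with
    | none => rfl
    | some l =>
      dsimp only
      apply ih
      · simpa [PySem.Dict.modify] using PySem.Dict.nodup_keys_insert _ _ _ hnd
      · intro x hx
        simp [PySem.Dict.modify, PySem.Dict.contains_insert, hc x (List.mem_cons_of_mem _ hx)]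
      · intro x hx
        exact hrun x (List.mem_cons_of_mem _ hx)

-- initial BFS state
lemma LInv_init (Gd : PySem.Dict String (List String)) (s : String) :
    LInv Gd s 0 ((PySem.Dict.empty).insert s 0) [s] := by
  refine ⟨?_, List.nodup_singleton s, ?_⟩
  · intro t v
    rw [PySem.Dict.get?_insert]
    have hlvl : ∀ t', (isLvl Gd s 0 t' ↔ t' = s) := by
      intro t'
      unfold isLvl
      rw [rk_zero]
      simp
    constructor
    · intro h
      by_cases ht : t = s
      · rw [if_pos ht] at h
        exact ⟨0, le_refl 0, by exact_mod_cast (Option.some_inj.mp h).symm, (hlvl t).mpr ht⟩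
      · rw [if_neg ht, PySem.Dict.get?_empty] at h
        cases h
    · intro ⟨j, hj, hvj, hLvl⟩
      have hj0 : j = 0 := Nat.le_zero.mp hj
      subst hj0
      have ht : t = s := (hlvl t).mp hLvl
      rw [if_pos ht, hvj]
      rfl
  · intro t
    unfold isLvl
    rw [rk_zero]
    simp

-- the whole BFS for source s returns the level function
lemma bfs_run (Gd : PySem.Dict String (List String)) (hnd : Gd.keys.Nodup) (s : String)
    (hkeys : ∀ m, ∀ t ∈ rk Gd s m, t ∈ Gd.keys) :
    ∃ d, bfsGoA Gd (1 + Gd.size + Gd.values.foldl (fun a l => a + l.length) 0)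
        ((PySem.Dict.empty).insert s 0) [s] = some d ∧
      ∀ t v, d.get? t = some v ↔ ∃ j : Nat, v = (j : Int) ∧ isLvl Gd s j t := by
  have hkl : Gd.keys.toFinset.card = Gd.size := by
    rw [List.toFinset_card_of_nodup hnd]
    simp [PySem.Dict.keys, PySem.Dict.size]
  have hfuel : (Gd.keys.toFinset.card - (rk Gd s 0).card) + [s].length
      ≤ 1 + Gd.size + Gd.values.foldl (fun a l => a + l.length) 0 := by
    rw [hkl]
    simp only [List.length_singleton]
    omega
  obtain ⟨dfin, hrun, hiff⟩ := levelGo_run Gd s hkeys _ 0 _ [s] (LInv_init Gd s) hfuel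
  rw [bfs_eq]
  exact ⟨dfin, hrun, hiff⟩

-- the two ports agree on every input satisfying Pre_
lemma ports_eq (G : List (String × List String)) (flows : List (String × Int))
    (hPre : Pre_transformed_graph G flows) :
    transformed_graph G flows = transformed_graph_alt G flows := by
  unfold Pre_transformed_graph at hPre
  simp only [transformed_graph, transformed_graph_alt]
  set Gd := PySem.Dict.ofList G with hGd
  set nodes := "AA" :: (((PySem.Dict.ofList flows).items.filter (fun p => decide (0 < p.2))).map Prod.fst) with hnodes
  set GG0 := nodes.foldl (fun d n => d.insert n ([] : List (String × Int))) PySem.Dict.empty with hGG0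
  set fuel := 1 + Gd.size + Gd.values.foldl (fun a l => a + l.length) 0 with hfuel
  set DF := (List.range Gd.size).foldl (fun d _ => roundB nodes Gd.items d)
    (nodes.foldl (fun d s => d.insert (s, s) (0 : Int)) PySem.Dict.empty) with hDF
  have hndG : Gd.keys.Nodup := PySem.Dict.nodup_keys_ofList G
  have hnd : GG0.keys.Nodup := by
    rw [hGG0]
    exact PySem.Dict.nodup_keys_foldl_insert nodes _ _ PySem.Dict.nodup_keys_empty
  have hc : ∀ x ∈ nodes, GG0.contains x = true := by
    intro x hx
    rw [hGG0, PySem.Dict.contains_iff_mem_keys, PySem.Dict.keys_foldl_insert]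
    simpa [PySem.Dict.keys_empty, PySem.Set.update_nil_left, PySem.Set.mem_ofList] using hx
  have hrun : ∀ s ∈ nodes, ∃ d, bfsGoA Gd fuel ((PySem.Dict.empty).insert s 0) [s] = some d ∧
      entriesA d s nodes = rowB DF s nodes := by
    intro s hs
    obtain ⟨h1, h2⟩ := hPre s hs
    have hkeys : ∀ m, ∀ t ∈ rk Gd s m, t ∈ Gd.keys := pre_rk_keys Gd nodes s hs h1
    obtain ⟨d, hd, hiff⟩ := bfs_run Gd hndG s hkeys
    refine ⟨d, hd, entries_eq_row d DF s nodes ?_⟩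
    intro t ht hts htAA
    have hreach : t ∈ rk Gd s ((PySem.List.dedup (nodes ++ Gd.keys ++ Gd.values.flatten)).length) :=
      pre_rk_reach Gd nodes s t (h2 t ht hts htAA)
    obtain ⟨j, _, hLvl⟩ := exists_isLvl Gd s hreach
    rw [(hiff t (j : Int)).mpr ⟨j, rfl, hLvl⟩, hDF,
      bf_value Gd hndG nodes s hs hkeys hLvl]
  rw [outer_eq_assemble Gd fuel DF nodes nodes GG0 hnd hc hrun]

-- ===== VERDICT (by name: the statement is the Claim_ definition above) =====
theorem transformed_graph_spec : Claim_equal_transformed_graph := by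
  intro G flows _hDom hPre
  unfold Spec_transformed_graph
  exact ports_eq G flows hPre
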